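-- pv_equiv track=rewrite | github.com/shsh26/legendary-guacamole | Programmers/challenges02.py | solution
-- ===== SOURCE A (Python) =====
-- def solution(numbers: list):
--     answer = []
--     for i in numbers:
--         j = i
--         while True:
--             j += 1
--             count = 0
--             for x in bin(i ^ j)[2:]:
--                 if x == '1':
--                     count += 1
--             if count < 3:
--                 break
--         answer.append(j)
--     return answer
-- ===== SOURCE B (Python) =====
-- def solution(numbers: list):
--     # Closed form: the smallest j > i with <=2 differing bits (popcount of |i^j|,
--     # as A counts via bin()) is i+1, unless the lowest set bit of m = |i+1| is
--     # >= 4, in which case it is i + lowbit(m)//2.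
--     def nxt(i):
--         m = abs(i + 1)
--         low = m & -m
--         return i + (low // 2 if low >= 4 else 1)
--     return [nxt(i) for i in numbers]
-- ===== Notes on version B (the rewrite author's own statement) =====
-- stated objective: faster
-- what changed: Replaces A's unbounded linear search over j (each step re-counting '1' characters of bin(i^j)) with a closed-form bit-manipulation answer: j = i+1 unless the lowest set bit of |i+1| is >= 4, in which case j = i + lowbit(|i+1|)//2.
import Mathlib
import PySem

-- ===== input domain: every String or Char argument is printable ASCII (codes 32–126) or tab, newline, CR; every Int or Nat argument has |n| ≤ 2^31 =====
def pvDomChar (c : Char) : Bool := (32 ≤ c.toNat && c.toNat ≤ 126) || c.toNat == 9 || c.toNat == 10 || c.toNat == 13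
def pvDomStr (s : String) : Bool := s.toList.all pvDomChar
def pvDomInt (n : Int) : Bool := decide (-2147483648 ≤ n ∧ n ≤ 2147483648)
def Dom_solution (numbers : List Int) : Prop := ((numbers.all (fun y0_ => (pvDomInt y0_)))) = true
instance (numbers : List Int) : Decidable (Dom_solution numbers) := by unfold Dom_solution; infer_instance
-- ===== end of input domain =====

-- B replaces A's linear search over j (re-counting '1' chars of bin(i^j) each step)
-- with a closed-form bit-manipulation answer per element; equal return values proved below.

-- ===== PORT A =====
-- inner for-loop of A: count '1' characters of bin(i ^ j)[2:]
def pvCount (x : Int) : Int :=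
  ((PySem.Int.toBinChars0b x).drop 2).foldl (fun c ch => if ch = '1' then c + 1 else c) 0

-- A's `while True` loop starting at j = i; the Nat fuel is only a totality guard:
-- lemma pvLoopA_exact below is applied with fuel (i+1).natAbs + 2, proved sufficient.
def pvLoopA (i : Int) : Nat → Int → Int
  | 0, j => j + 1
  | fuel+1, j =>
    let j' := j + 1
    if pvCount (PySem.Int.bxor i j') < 3 then j' else pvLoopA i fuel j'

def solution (numbers : List Int) : List Int :=
  numbers.foldl (fun answer i => answer ++ [pvLoopA i ((i + 1).natAbs + 2) i]) []

-- ===== PORT B =====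
def pvNxt (i : Int) : Int :=
  let m := |i + 1|
  let low := PySem.Int.band m (-m)
  i + (if 4 ≤ low then PySem.Int.floordiv low 2 else 1)

def solution_alt (numbers : List Int) : List Int :=
  numbers.map pvNxt

-- ===== PRECONDITION & SPEC =====
def Spec_solution (numbers : List Int) (out : List Int) : Prop := out = solution_alt numbers
instance (numbers : List Int) (out : List Int) : Decidable (Spec_solution numbers out) := by unfold Spec_solution; infer_instance

-- ===== CLAIM (what is proved, stated in full; the proofs are below) =====
def Claim_equal_solution : Prop := ∀ (numbers : List Int), Dom_solution numbers → Spec_solution numbers (solution numbers)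

-- ===== LEMMAS AND PROOFS =====

-- popcount of a natural number
def pc : Nat → Nat
  | 0 => 0
  | n+1 => pc ((n+1)/2) + (n+1) % 2
decreasing_by exact Nat.div_lt_self (Nat.succ_pos n) one_lt_two

-- lowest set bit (as a value); lowb 0 = 0
def lowb : Nat → Nat
  | 0 => 0
  | n+1 => if (n+1) % 2 = 1 then 1 else 2 * lowb ((n+1)/2)
decreasing_by exact Nat.div_lt_self (Nat.succ_pos n) one_lt_two

-- the distance from i to A's answer, as a function of m = |i+1|
def off (m : Nat) : Nat := if 4 ≤ lowb m then lowb m / 2 else 1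

lemma pc_rec (n : Nat) (h : n ≠ 0) : pc n = pc (n/2) + n % 2 := by
  rcases n with _ | k
  · exact absurd rfl h
  · rw [pc]

lemma pc_two_mul_add (a b : Nat) (hb : b < 2) : pc (2*a + b) = pc a + b := by
  rcases Nat.eq_zero_or_pos (2*a + b) with h | h
  · have ha : a = 0 := by omega
    have hb0 : b = 0 := by omega
    subst ha hb0; simp [pc]
  · rw [pc_rec _ (by omega)]
    have h1 : (2*a + b)/2 = a := by omega
    have h2 : (2*a + b) % 2 = b := by omega
    rw [h1, h2]

lemma pc_eq_zero_iff (n : Nat) : pc n = 0 ↔ n = 0 := by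
  induction n using Nat.strong_induction_on with
  | _ n ih =>
    rcases n with _ | k
    · simp [pc]
    · rw [pc_rec _ (by omega)]
      constructor
      · intro h
        have h2 : (k+1) % 2 = 0 := by omega
        have h1 : pc ((k+1)/2) = 0 := by omega
        have := (ih ((k+1)/2) (by omega)).mp h1
        omega
      · intro h; omega

lemma pc_one : pc 1 = 1 := by simp [pc]

lemma xorP (a b c d : Nat) (hb : b < 2) (hd : d < 2) :
    (2*a + b) ^^^ (2*c + d) = 2*(a ^^^ c) + (b ^^^ d) := by
  apply Nat.eq_of_testBit_eq
  intro k
  have hlt : b ^^^ d < 2 := by interval_cases b <;> interval_cases d <;> decide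
  have h1 : (2*a + b) / 2 = a := by omega
  have h2 : (2*c + d) / 2 = c := by omega
  have h3 : (2*(a ^^^ c) + (b ^^^ d)) / 2 = a ^^^ c := by omega
  have m1 : (2*a + b) % 2 = b := by omega
  have m2 : (2*c + d) % 2 = d := by omega
  have m3 : (2*(a ^^^ c) + (b ^^^ d)) % 2 = b ^^^ d := by omega
  cases k with
  | zero =>
    rw [Nat.testBit_xor, Nat.testBit_zero, Nat.testBit_zero, Nat.testBit_zero, m1, m2, m3]
    interval_cases b <;> interval_cases d <;> decide
  | succ k =>
    rw [Nat.testBit_xor, Nat.testBit_add_one, Nat.testBit_add_one, Nat.testBit_add_one,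
      h1, h2, h3, ← Nat.testBit_xor]

lemma landP (a b c d : Nat) (hb : b < 2) (hd : d < 2) :
    (2*a + b) &&& (2*c + d) = 2*(a &&& c) + (b &&& d) := by
  apply Nat.eq_of_testBit_eq
  intro k
  have hlt : b &&& d < 2 := by interval_cases b <;> interval_cases d <;> decide
  have h1 : (2*a + b) / 2 = a := by omega
  have h2 : (2*c + d) / 2 = c := by omega
  have h3 : (2*(a &&& c) + (b &&& d)) / 2 = a &&& c := by omega
  have m1 : (2*a + b) % 2 = b := by omega
  have m2 : (2*c + d) % 2 = d := by omega
  have m3 : (2*(a &&& c) + (b &&& d)) % 2 = b &&& d := by omega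
  cases k with
  | zero =>
    rw [Nat.testBit_and, Nat.testBit_zero, Nat.testBit_zero, Nat.testBit_zero, m1, m2, m3]
    interval_cases b <;> interval_cases d <;> decide
  | succ k =>
    rw [Nat.testBit_and, Nat.testBit_add_one, Nat.testBit_add_one, Nat.testBit_add_one,
      h1, h2, h3, ← Nat.testBit_and]

lemma pc_xor_pos (x y : Nat) (h : x ≠ y) : 1 ≤ pc (x ^^^ y) := by
  rcases Nat.eq_zero_or_pos (pc (x ^^^ y)) with h0 | h0
  · have := (pc_eq_zero_iff _).mp h0
    exact absurd (Nat.xor_eq_zero_iff.mp this) h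
  · exact h0

lemma lowb_odd (k : Nat) : lowb (2*k + 1) = 1 := by
  rw [show 2*k+1 = (2*k)+1 from rfl, lowb]
  have : (2*k+1) % 2 = 1 := by omega
  simp [this]

lemma lowb_even (k : Nat) : lowb (2*k) = 2 * lowb k := by
  rcases k with _ | k
  · simp [lowb]
  · rw [show 2*(k+1) = (2*k+1)+1 by ring, lowb]
    have h1 : (2*k+1+1) % 2 = 0 := by omega
    have h2 : (2*k+1+1) / 2 = k+1 := by omega
    simp [h1, h2]

lemma lowb_le (n : Nat) : lowb n ≤ n := by
  induction n using Nat.strong_induction_on with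
  | _ n ih =>
    rcases Nat.even_or_odd n with ⟨k, hk⟩ | ⟨k, hk⟩
    · subst hk
      rw [show k + k = 2*k by ring, lowb_even]
      rcases Nat.eq_zero_or_pos k with h | h
      · simp [h, lowb]
      · have := ih k (by omega)
        omega
    · subst hk
      rw [lowb_odd]; omega

lemma lowb_pos (n : Nat) (h : n ≠ 0) : 1 ≤ lowb n := by
  induction n using Nat.strong_induction_on with
  | _ n ih =>
    rcases Nat.even_or_odd n with ⟨k, hk⟩ | ⟨k, hk⟩
    · subst hk
      rw [show k + k = 2*k by ring, lowb_even]
      have hk0 : k ≠ 0 := by omega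
      have := ih k (by omega) hk0
      omega
    · subst hk; rw [lowb_odd]

lemma lowb_even_of_two_le (n : Nat) (h : 2 ≤ lowb n) : 2 ∣ lowb n := by
  rcases Nat.even_or_odd n with ⟨k, hk⟩ | ⟨k, hk⟩
  · subst hk; rw [show k + k = 2*k by ring, lowb_even]; exact ⟨lowb k, rfl⟩
  · subst hk; rw [lowb_odd] at h; omega

lemma off_pos (m : Nat) : 1 ≤ off m := by
  unfold off; split <;> omega

lemma off_le (m : Nat) (h : 1 ≤ m) : off m ≤ m := by
  unfold off
  have := lowb_le m
  split <;> omega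

lemma off_eq_half (k : Nat) (h : 2 ≤ lowb k) : off k = lowb k / 2 := by
  unfold off; split <;> omega

lemma xor_oo (a c : Nat) : (2*a+1) ^^^ (2*c+1) = 2*(a ^^^ c) := by
  simpa using xorP a 1 c 1 (by omega) (by omega)

lemma xor_ee (a c : Nat) : (2*a) ^^^ (2*c) = 2*(a ^^^ c) := by
  simpa using xorP a 0 c 0 (by omega) (by omega)

lemma xor_oe (a c : Nat) : (2*a+1) ^^^ (2*c) = 2*(a ^^^ c) + 1 := by
  simpa using xorP a 1 c 0 (by omega) (by omega)

lemma xor_eo (a c : Nat) : (2*a) ^^^ (2*c+1) = 2*(a ^^^ c) + 1 := by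
  simpa using xorP a 0 c 1 (by omega) (by omega)

lemma pc_double (a : Nat) : pc (2*a) = pc a := by
  simpa using pc_two_mul_add a 0 (by omega)

lemma pc_double_add_one (a : Nat) : pc (2*a+1) = pc a + 1 := by
  simpa using pc_two_mul_add a 1 (by omega)

-- the four upward facts: least j > n with pc(n^^^j) ≤ 1 is n + lowb (n+1);
-- least j > n with pc(n^^^j) ≤ 2 is n + off (n+1)
lemma up4 (n : Nat) :
    pc (n ^^^ (n + lowb (n+1))) ≤ 1 ∧
    (∀ d, 1 ≤ d → d < lowb (n+1) → 2 ≤ pc (n ^^^ (n + d))) ∧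
    pc (n ^^^ (n + off (n+1))) ≤ 2 ∧
    (∀ d, 1 ≤ d → d < off (n+1) → 3 ≤ pc (n ^^^ (n + d))) := by
  induction n using Nat.strong_induction_on with
  | _ n ih =>
    rcases Nat.even_or_odd n with ⟨k, hk⟩ | ⟨k, hk⟩
    · -- n = 2k even: answer is n+1 in both cases
      have hk2 : n = 2*k := by omega
      subst hk2
      have hl : lowb (2*k+1) = 1 := lowb_odd k
      have ho : off (2*k+1) = 1 := by unfold off; rw [hl]; norm_num
      have hx : (2*k) ^^^ (2*k + 1) = 1 := by
        have := xor_eo k k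
        simpa [Nat.xor_self] using this
      refine ⟨?_, ?_, ?_, ?_⟩
      · rw [hl, hx, pc_one]
      · intro d hd1 hd2; rw [hl] at hd2; omega
      · rw [ho, hx, pc_one]; omega
      · intro d hd1 hd2; rw [ho] at hd2; omega
    · -- n = 2k+1 odd
      subst hk
      obtain ⟨iGE, iGM, iFE, iFM⟩ := ih k (by omega)
      have hL1 : 1 ≤ lowb (k+1) := lowb_pos (k+1) (by omega)
      have hlow : lowb (2*k+1+1) = 2 * lowb (k+1) := by
        rw [show 2*k+1+1 = 2*(k+1) by ring, lowb_even]
      refine ⟨?_, ?_, ?_, ?_⟩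
      · -- G existence
        rw [hlow, show 2*k+1 + 2*lowb (k+1) = 2*(k + lowb (k+1)) + 1 by ring,
          xor_oo, pc_double]
        exact iGE
      · -- G minimality
        intro d hd1 hd2
        rw [hlow] at hd2
        rcases Nat.even_or_odd d with ⟨e, he⟩ | ⟨e, he⟩
        · subst he
          rw [show 2*k+1 + (e+e) = 2*(k+e) + 1 by ring, xor_oo, pc_double]
          exact iGM e (by omega) (by omega)
        · have he2 : d = 2*e+1 := by omega
          subst he2
          rw [show 2*k+1 + (2*e+1) = 2*(k+(e+1)) by ring, xor_oe, pc_double_add_one]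
          have := pc_xor_pos k (k+(e+1)) (by omega)
          omega
      · -- F existence
        rcases Nat.lt_or_ge (lowb (k+1)) 2 with hL | hL
        · -- lowb (k+1) = 1, so k is even
          have hL' : lowb (k+1) = 1 := by omega
          have hke : k % 2 = 0 := by
            by_contra hodd
            have : k + 1 = 2*(k/2) + 2 := by omega
            rw [this, show 2*(k/2)+2 = 2*(k/2+1) by ring, lowb_even] at hL'
            have := lowb_pos (k/2+1) (by omega)
            omega
          obtain ⟨t, ht⟩ : ∃ t, k = 2*t := ⟨k/2, by omega⟩
          have ho : off (2*k+1+1) = 1 := by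
            unfold off; rw [hlow, hL']; norm_num
          have hx : k ^^^ (k+1) = 1 := by
            subst ht
            simpa [Nat.xor_self] using xor_eo t t
          rw [ho, show 2*k+1+1 = 2*(k+1) by ring, xor_oe, hx, pc_double_add_one, pc_one]
        · -- lowb (k+1) ≥ 2
          obtain ⟨L2, hL2⟩ := lowb_even_of_two_le (k+1) hL
          have ho : off (2*k+1+1) = lowb (k+1) := by
            unfold off; rw [hlow]
            have : 4 ≤ 2 * lowb (k+1) := by omega
            simp [this]
          have hoff : off (k+1) = L2 := by rw [off_eq_half (k+1) hL, hL2]; omega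
          rw [ho, hL2, show 2*k+1 + 2*L2 = 2*(k+L2) + 1 by ring, xor_oo, pc_double]
          rw [hoff] at iFE
          exact iFE
      · -- F minimality
        intro d hd1 hd2
        rcases Nat.lt_or_ge (lowb (k+1)) 2 with hL | hL
        · have ho : off (2*k+1+1) = 1 := by
            unfold off; rw [hlow]
            have h4 : ¬ 4 ≤ 2 * lowb (k+1) := by omega
            simp [h4]
          rw [ho] at hd2; omega
        · obtain ⟨L2, hL2⟩ := lowb_even_of_two_le (k+1) hL
          have hL2pos : 1 ≤ L2 := by omega
          have ho : off (2*k+1+1) = lowb (k+1) := by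
            unfold off; rw [hlow]
            have : 4 ≤ 2 * lowb (k+1) := by omega
            simp [this]
          have hoff : off (k+1) = L2 := by rw [off_eq_half (k+1) hL, hL2]; omega
          rw [ho, hL2] at hd2
          rcases Nat.even_or_odd d with ⟨e, he⟩ | ⟨e, he⟩
          · subst he
            rw [show 2*k+1 + (e+e) = 2*(k+e) + 1 by ring, xor_oo, pc_double]
            exact iFM e (by omega) (by omega)
          · have he2 : d = 2*e+1 := by omega
            subst he2
            rw [show 2*k+1 + (2*e+1) = 2*(k+(e+1)) by ring, xor_oe, pc_double_add_one]
            have := iGM (e+1) (by omega) (by omega)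
            omega

-- the downward counterparts, reading a = |i+1| for negative i
lemma down4 (a : Nat) :
    pc (a ^^^ (a - lowb a)) ≤ 1 ∧
    (∀ d, 1 ≤ d → d < lowb a → 2 ≤ pc (a ^^^ (a - d))) ∧
    pc (a ^^^ (a - off a)) ≤ 2 ∧
    (∀ d, 1 ≤ d → d < off a → 3 ≤ pc (a ^^^ (a - d))) := by
  induction a using Nat.strong_induction_on with
  | _ a ih =>
    rcases Nat.even_or_odd a with ⟨k, hk⟩ | ⟨k, hk⟩
    · have hk2 : a = 2*k := by omega
      subst hk2
      rcases Nat.eq_zero_or_pos k with hk0 | hk0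
      · subst hk0
        norm_num [lowb, off, pc]
        omega
      · obtain ⟨iGE, iGM, iFE, iFM⟩ := ih k (by omega)
        have hL1 : 1 ≤ lowb k := lowb_pos k (by omega)
        have hLk : lowb k ≤ k := lowb_le k
        have hlow : lowb (2*k) = 2 * lowb k := lowb_even k
        refine ⟨?_, ?_, ?_, ?_⟩
        · -- G existence
          rw [hlow, show 2*k - 2*lowb k = 2*(k - lowb k) by omega, xor_ee, pc_double]
          exact iGE
        · -- G minimality
          intro d hd1 hd2
          rw [hlow] at hd2
          rcases Nat.even_or_odd d with ⟨e, he⟩ | ⟨e, he⟩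
          · subst he
            rw [show 2*k - (e+e) = 2*(k-e) by omega, xor_ee, pc_double]
            exact iGM e (by omega) (by omega)
          · have he2 : d = 2*e+1 := by omega
            subst he2
            rw [show 2*k - (2*e+1) = 2*(k-(e+1)) + 1 by omega, xor_eo, pc_double_add_one]
            have := pc_xor_pos k (k-(e+1)) (by omega)
            omega
        · -- F existence
          rcases Nat.lt_or_ge (lowb k) 2 with hL | hL
          · have hL' : lowb k = 1 := by omega
            have hko : k % 2 = 1 := by
              by_contra heven
              obtain ⟨t, ht⟩ : ∃ t, k = 2*t := ⟨k/2, by omega⟩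
              subst ht
              rw [lowb_even] at hL'
              have := lowb_pos t (by omega)
              omega
            obtain ⟨t, ht⟩ : ∃ t, k = 2*t+1 := ⟨k/2, by omega⟩
            have ho : off (2*k) = 1 := by
              unfold off; rw [hlow, hL']; norm_num
            have hx : k ^^^ (k-1) = 1 := by
              subst ht
              have : 2*t+1-1 = 2*t := by omega
              rw [this]
              simpa [Nat.xor_self] using xor_oe t t
            rw [ho, show 2*k - 1 = 2*(k-1) + 1 by omega,
              show 2*(k-1) + 1 = 2*(k-1) + 1 from rfl]
            have hx2 : (2*k) ^^^ (2*(k-1)+1) = 2*(k ^^^ (k-1)) + 1 := xor_eo k (k-1)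
            rw [hx2, hx, pc_double_add_one, pc_one]
          · obtain ⟨L2, hL2⟩ := lowb_even_of_two_le k hL
            have ho : off (2*k) = lowb k := by
              unfold off; rw [hlow]
              have : 4 ≤ 2 * lowb k := by omega
              simp [this]
            have hoff : off k = L2 := by rw [off_eq_half k hL, hL2]; omega
            rw [ho, show 2*k - lowb k = 2*(k - L2) by omega, xor_ee, pc_double]
            rw [hoff] at iFE
            exact iFE
        · -- F minimality
          intro d hd1 hd2
          rcases Nat.lt_or_ge (lowb k) 2 with hL | hL
          · have ho : off (2*k) = 1 := by
              unfold off; rw [hlow]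
              have h4 : ¬ 4 ≤ 2 * lowb k := by omega
              simp [h4]
            rw [ho] at hd2; omega
          · obtain ⟨L2, hL2⟩ := lowb_even_of_two_le k hL
            have hL2pos : 1 ≤ L2 := by omega
            have ho : off (2*k) = lowb k := by
              unfold off; rw [hlow]
              have : 4 ≤ 2 * lowb k := by omega
              simp [this]
            have hoff : off k = L2 := by rw [off_eq_half k hL, hL2]; omega
            rw [ho, hL2] at hd2
            rcases Nat.even_or_odd d with ⟨e, he⟩ | ⟨e, he⟩
            · subst he
              rw [show 2*k - (e+e) = 2*(k-e) by omega, xor_ee, pc_double]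
              exact iFM e (by omega) (by omega)
            · have he2 : d = 2*e+1 := by omega
              subst he2
              rw [show 2*k - (2*e+1) = 2*(k-(e+1)) + 1 by omega, xor_eo, pc_double_add_one]
              have := iGM (e+1) (by omega) (by omega)
              omega
    · -- a = 2k+1 odd: lowb = 1, off = 1, both minimalities vacuous
      subst hk
      have hl : lowb (2*k+1) = 1 := lowb_odd k
      have ho : off (2*k+1) = 1 := by unfold off; rw [hl]; norm_num
      have hx : (2*k+1) ^^^ (2*k+1 - 1) = 1 := by
        rw [show 2*k+1-1 = 2*k by omega]
        simpa [Nat.xor_self] using xor_oe k k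
      refine ⟨?_, ?_, ?_, ?_⟩
      · rw [hl, hx, pc_one]
      · intro d hd1 hd2; rw [hl] at hd2; omega
      · rw [ho, hx, pc_one]; omega
      · intro d hd1 hd2; rw [ho] at hd2; omega

-- counting '1' chars of Nat.toDigits 2 is pc
lemma count_toDigitsCore (fuel n : Nat) (ds : List Char) (c : Int) (h : n < fuel) :
    (Nat.toDigitsCore 2 fuel n ds).foldl (fun c ch => if ch = '1' then c + 1 else c) c
      = ds.foldl (fun c ch => if ch = '1' then c + 1 else c) (c + pc n) := by
  induction fuel generalizing n ds c with
  | zero => omega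
  | succ fuel ih =>
    rw [Nat.toDigitsCore]
    rcases Nat.mod_two_eq_zero_or_one n with hm | hm
    · have hdc : (n % 2).digitChar = '0' := by rw [hm]; rfl
      by_cases h0 : n / 2 = 0
      · have hn : n = 0 := by omega
        subst hn
        simp [pc, Nat.digitChar]
      · simp only [hdc, h0, if_false]
        rw [ih (n/2) _ c (by omega)]
        have : pc n = pc (n/2) := by rw [pc_rec n (by omega), hm]; omega
        rw [this]
        simp
    · have hdc : (n % 2).digitChar = '1' := by rw [hm]; rfl
      by_cases h0 : n / 2 = 0
      · have hn : n = 1 := by omega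
        subst hn
        simp [pc_one, Nat.digitChar]
      · simp only [hdc, h0, if_false]
        rw [ih (n/2) _ c (by omega)]
        have : pc n = pc (n/2) + 1 := by rw [pc_rec n (by omega), hm]
        rw [this]
        simp
        ring_nf

lemma pvCount_eq (x : Int) : pvCount x = (pc x.natAbs : Int) := by
  unfold pvCount
  by_cases hx : x < 0
  · simp only [PySem.Int.toBinChars0b, hx, if_true, List.drop_succ_cons, List.drop_zero,
      List.foldl_cons, if_neg (by decide : ¬ ('b' = '1'))]
    rw [Nat.toDigits, count_toDigitsCore _ _ _ _ (by omega)]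
    simp
  · have h : x.toNat = x.natAbs := by omega
    simp only [PySem.Int.toBinChars0b, hx, if_false, List.drop_succ_cons, List.drop_zero, h]
    rw [Nat.toDigits, count_toDigitsCore _ _ _ _ (by omega)]
    simp

-- the loop returns the least j > start satisfying the count condition, given enough fuel
lemma pvLoopA_exact (i js : Int)
    (hE : pvCount (PySem.Int.bxor i js) < 3)
    (hM : ∀ k : Int, i < k → k < js → ¬ pvCount (PySem.Int.bxor i k) < 3) :
    ∀ (fuel : Nat) (j : Int), i ≤ j → j < js → (js - j).toNat ≤ fuel →
      pvLoopA i fuel j = js := by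
  intro fuel
  induction fuel with
  | zero => intro j _ hj hf; omega
  | succ fuel ih =>
    intro j hij hj hf
    rw [pvLoopA]
    by_cases h : pvCount (PySem.Int.bxor i (j+1)) < 3
    · simp only [h, if_true]
      by_contra hne
      exact hM (j+1) (by omega) (by omega) h
    · simp only [h, if_false]
      have hne : j + 1 ≠ js := by
        intro he; rw [he] at h; exact h hE
      exact ih (j+1) (by omega) (by omega) (by omega)

lemma bxor_neg_neg (a b : Int) (ha : a < 0) (hb : b < 0) :
    PySem.Int.bxor a b = (((-a-1).toNat ^^^ (-b-1).toNat : Nat) : Int) := by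
  simp [PySem.Int.bxor, not_le.mpr ha, not_le.mpr hb]

-- B's bit trick: |i+1| & -|i+1| is lowb |i+1|
lemma sub_land_pred (m : Nat) : m - (m &&& (m-1)) = lowb m := by
  induction m using Nat.strong_induction_on with
  | _ m ih =>
    rcases Nat.eq_zero_or_pos m with h0 | h0
    · subst h0; simp [lowb]
    · rcases Nat.even_or_odd m with ⟨k, hk⟩ | ⟨k, hk⟩
      · have hk2 : m = 2*k := by omega
        subst hk2
        have hk1 : 1 ≤ k := by omega
        have hme : 2*k - 1 = 2*(k-1) + 1 := by omega
        rw [hme, show (2*k : Nat) = 2*k + 0 from rfl, landP k 0 (k-1) 1 (by omega) (by omega)]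
        have hle : k &&& (k-1) ≤ k := Nat.and_le_left
        rw [show 2*k + 0 - (2*(k &&& (k-1)) + (0 &&& 1)) = 2*(k - (k &&& (k-1))) by
          have h01 : (0 &&& 1 : Nat) = 0 := rfl
          rw [h01]; omega]
        rw [ih k (by omega), show (2*k + 0 : Nat) = 2*k from rfl, lowb_even]
      · have hk2 : m = 2*k+1 := by omega
        subst hk2
        have hme : 2*k+1-1 = 2*k + 0 := by omega
        rw [hme, landP k 1 k 0 (by omega) (by omega), Nat.and_self, lowb_odd]
        simp [Nat.and_zero]

lemma band_neg_self (m : Nat) : PySem.Int.band (m : Int) (-(m : Int)) = (lowb m : Int) := by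
  rcases m with _ | k
  · norm_num [PySem.Int.band, lowb]
  · have h1 : (0:Int) ≤ ((k+1 : Nat) : Int) := by positivity
    have h2 : ¬ (0:Int) ≤ -((k+1 : Nat) : Int) := by push_cast; omega
    simp only [PySem.Int.band, h1, if_true, h2, if_false]
    have e1 : (((k+1 : Nat) : Int)).toNat = k+1 := by omega
    have e2 : (-(-((k+1 : Nat) : Int)) - 1).toNat = k := by push_cast; omega
    rw [e1, e2]
    have := sub_land_pred (k+1)
    rw [show k+1-1 = k from rfl] at this
    rw [this]

-- B's per-element value is i + off |i+1|
lemma pvNxt_eq (i : Int) : pvNxt i = i + (off (i+1).natAbs : Int) := by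
  unfold pvNxt
  have habs : |i + 1| = (((i+1).natAbs : Nat) : Int) := Int.abs_eq_natAbs (i+1)
  simp only [habs, band_neg_self]
  by_cases h4 : (4 : Int) ≤ ((lowb (i+1).natAbs : Nat) : Int)
  · have h4' : 4 ≤ lowb (i+1).natAbs := by exact_mod_cast h4
    have hoff : off (i+1).natAbs = lowb (i+1).natAbs / 2 := by unfold off; simp [h4']
    rw [if_pos h4, hoff]
    have : PySem.Int.floordiv ((lowb (i+1).natAbs : Nat) : Int) 2
        = ((lowb (i+1).natAbs / 2 : Nat) : Int) := by
      exact_mod_cast PySem.Int.floordiv_natCast (lowb (i+1).natAbs) 2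
    rw [this]
  · have h4' : ¬ 4 ≤ lowb (i+1).natAbs := by
      intro h; exact h4 (by exact_mod_cast h)
    have hoff : off (i+1).natAbs = 1 := by unfold off; simp [h4']
    rw [if_neg h4, hoff]
    norm_num

-- A's per-element value is the same
lemma step_eq (i : Int) : pvLoopA i ((i + 1).natAbs + 2) i = i + (off (i+1).natAbs : Int) := by
  rcases lt_trichotomy i (-1) with hneg | hm1 | hpos
  · -- i ≤ -2: the search moves among negative numbers
    set a : Nat := (-i-1).toNat with ha
    have ha1 : 1 ≤ a := by omega
    have hA : (i+1).natAbs = a := by omega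
    have hoa : off a ≤ a := off_le a ha1
    have hop : 1 ≤ off a := off_pos a
    rw [hA]
    apply pvLoopA_exact
    · -- the candidate satisfies the condition
      have hjs : i + (off a : Int) < 0 := by omega
      rw [bxor_neg_neg i _ (by omega) hjs, pvCount_eq]
      have e1 : (-i-1).toNat = a := by omega
      have e2 : (-(i + (off a : Int))-1).toNat = a - off a := by omega
      rw [e1, e2, Int.natAbs_natCast]
      have h2 := (down4 a).2.2.1
      have : ((pc (a ^^^ (a - off a)) : Nat) : Int) ≤ 2 := by exact_mod_cast h2
      omega
    · -- everything strictly between fails the condition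
      intro k hk1 hk2
      have hk0 : k < 0 := by omega
      set d : Nat := (k - i).toNat with hd
      have hd1 : 1 ≤ d := by omega
      have hd2 : d < off a := by omega
      rw [bxor_neg_neg i k (by omega) hk0, pvCount_eq]
      have e1 : (-i-1).toNat = a := by omega
      have e2 : (-k-1).toNat = a - d := by omega
      rw [e1, e2, Int.natAbs_natCast]
      have h3 := (down4 a).2.2.2 d hd1 hd2
      intro hcon
      have : (3 : Int) ≤ (pc (a ^^^ (a - d)) : Int) := by exact_mod_cast h3
      omega
    · omega
    · omega
    · omega
  · -- i = -1: closed computation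
    subst hm1
    have h0 : off (((-1 : Int) + 1).natAbs) = 1 := by
      norm_num
      unfold off
      simp [lowb]
    rw [h0]
    norm_num
    decide
  · -- i ≥ 0
    set n : Nat := i.toNat with hn
    have hi : 0 ≤ i := by omega
    have hA : (i+1).natAbs = n + 1 := by omega
    rw [hA]
    apply pvLoopA_exact
    · have hjs : i + (off (n+1) : Int) = ((n + off (n+1) : Nat) : Int) := by push_cast; omega
      rw [hjs, show i = ((n : Nat) : Int) by omega, PySem.Int.bxor_natCast, pvCount_eq,
        Int.natAbs_natCast]
      have := (up4 n).2.2.1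
      have : ((pc (n ^^^ (n + off (n+1))) : Nat) : Int) ≤ 2 := by exact_mod_cast this
      omega
    · intro k hk1 hk2
      set d : Nat := (k - i).toNat with hd
      have hd1 : 1 ≤ d := by omega
      have hd2 : d < off (n+1) := by omega
      have hkk : k = ((n + d : Nat) : Int) := by push_cast; omega
      rw [hkk, show i = ((n : Nat) : Int) by omega, PySem.Int.bxor_natCast, pvCount_eq,
        Int.natAbs_natCast]
      have h3 := (up4 n).2.2.2 d hd1 hd2
      intro hcon
      have : (3 : Int) ≤ (pc (n ^^^ (n + d)) : Int) := by exact_mod_cast h3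
      omega
    · omega
    · have := off_pos (n+1); omega
    · have := off_le (n+1) (by omega); omega

-- ===== VERDICT (by name: the statement is the Claim_ definition above) =====
theorem solution_spec : Claim_equal_solution := by
  intro numbers _
  unfold Spec_solution solution solution_alt
  rw [PySem.List.foldl_append_singleton_eq_map]
  exact List.map_congr_left (fun i _ => (step_eq i).trans (pvNxt_eq i).symm)
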